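-- pv_equiv track=rewrite | github.com/WGLab/SCOTCH | src/annotation.py | merge_boundaries_by_evidence
-- ===== SOURCE A (Python) =====
-- def merge_boundaries_by_evidence(boundaries, merge_distance=10):
--     # Sort boundaries by value (evidence) in descending order
--     sorted_boundaries = sorted(boundaries.items(), key=lambda item: item[1], reverse=True)
--     merged_boundaries = {}
--     while sorted_boundaries:
--         # Take the boundary with the highest evidence
--         base_position, base_value = sorted_boundaries.pop(0)
--         merged_value = base_value
--         to_remove = []
--         # Check nearby positions within the merge_distance
--         for i, (position, value) in enumerate(sorted_boundaries):
--             if abs(position - base_position) <= merge_distance: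
--                 merged_value += value
--                 to_remove.append(i)
--         # Remove merged positions from sorted_boundaries
--         for index in sorted(to_remove, reverse=True):
--             sorted_boundaries.pop(index)
--         # Add the merged boundary to the result
--         merged_boundaries[base_position] = merged_value
--     return merged_boundaries
-- ===== SOURCE B (Python) =====
-- def merge_boundaries_by_evidence(boundaries, merge_distance=10):
--     # Partition-based greedy: repeatedly take the highest-evidence item and,
--     # in one pass, sum absorbed neighbours and keep the surviving items.
--     items = sorted(boundaries.items(), key=lambda it: it[1], reverse=True)
--     out = []
--     while items:
--         pos, val = items[0]
--         total = val
--         keep = []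
--         for p, v in items[1:]:
--             if abs(p - pos) <= merge_distance:
--                 total += v
--             else:
--                 keep.append((p, v))
--         out.append((pos, total))
--         items = keep
--     return dict(out)
-- ===== Notes on version B (the rewrite author's own statement) =====
-- stated objective: alternative
-- what changed: Each round of A's greedy loop scans with enumerate, collects a to_remove index list, re-sorts it descending and pops the merged items out by index; B instead makes one partition pass per base that sums the absorbed neighbours and directly builds the surviving list, appending (position, total) pairs and forming the dict once at the end.
import Mathlib
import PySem

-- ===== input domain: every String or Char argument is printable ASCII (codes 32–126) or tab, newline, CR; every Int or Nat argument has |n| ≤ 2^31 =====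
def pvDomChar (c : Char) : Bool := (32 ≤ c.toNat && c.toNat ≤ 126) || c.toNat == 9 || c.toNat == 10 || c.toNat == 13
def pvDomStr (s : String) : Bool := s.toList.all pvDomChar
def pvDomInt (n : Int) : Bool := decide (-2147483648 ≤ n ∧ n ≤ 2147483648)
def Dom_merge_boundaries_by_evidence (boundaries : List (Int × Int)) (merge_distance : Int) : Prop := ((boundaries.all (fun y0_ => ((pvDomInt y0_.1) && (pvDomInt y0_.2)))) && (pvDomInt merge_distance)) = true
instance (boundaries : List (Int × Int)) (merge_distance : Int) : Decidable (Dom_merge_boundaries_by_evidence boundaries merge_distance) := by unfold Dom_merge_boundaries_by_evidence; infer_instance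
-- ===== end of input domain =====

-- ===== PORT A =====
-- B replaces A's enumerate/to_remove/pop-by-index bookkeeping with a single partition
-- pass per base, with no per-round index re-sort or pop-by-index (objective: alternative;
-- same asymptotic class, measurably faster constants on merge-heavy inputs).

-- 'sorted_boundaries.pop(index)' — the index is always in range here; the none-guard only keeps it total
def pvPopAt (cur : List (Int × Int)) (i : Int) : List (Int × Int) :=
  match PySem.List.pop? cur i with
  | some r => r.2
  | none => cur

-- body of A's inner 'for i, (position, value) in enumerate(sorted_boundaries):' loop
def pvAStep (md bp : Int) (st : Int × List Int) (iv : Int × (Int × Int)) : Int × List Int :=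
  if |iv.2.1 - bp| ≤ md then (st.1 + iv.2.2, st.2 ++ [iv.1]) else st

theorem pvPopAt_length_le (cur : List (Int × Int)) (i : Int) :
    (pvPopAt cur i).length ≤ cur.length := by
  unfold pvPopAt
  cases h : PySem.List.pop? cur i with
  | none => exact Nat.le_refl _
  | some r =>
    have := PySem.List.length_of_pop?_eq_some cur h
    show r.2.length ≤ cur.length
    omega

theorem pvPopFold_length_le (idxs : List Int) (cur : List (Int × Int)) :
    (idxs.foldl pvPopAt cur).length ≤ cur.length := by
  induction idxs generalizing cur with
  | nil => simp
  | cons i tl ih =>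
    simp only [List.foldl_cons]
    exact Nat.le_trans (ih _) (pvPopAt_length_le _ _)

-- the 'while sorted_boundaries:' loop of A
def pvALoop (md : Int) (l : List (Int × Int)) (merged : PySem.Dict Int Int) : PySem.Dict Int Int :=
  match l with
  | [] => merged
  | (bp, bv) :: rest =>
    let st := (PySem.List.enumerate rest).foldl (pvAStep md bp) (bv, ([] : List Int))
    pvALoop md ((PySem.List.sorted st.2 (fun x => x) true).foldl pvPopAt rest)
      (merged.insert bp st.1)
termination_by l.length
decreasing_by
  simp only [List.length_cons]
  exact Nat.lt_succ_of_le (pvPopFold_length_le _ _)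

def merge_boundaries_by_evidence (boundaries : List (Int × Int)) (merge_distance : Int) : List (Int × Int) :=
  (pvALoop merge_distance
    (PySem.List.sorted (PySem.Dict.ofList boundaries).items (fun item => item.2) true)
    PySem.Dict.empty).items

-- ===== PORT B =====
-- body of B's 'for p, v in items[1:]:' partition pass
def pvBStep (md pos : Int) (st : Int × List (Int × Int)) (pv : Int × Int) : Int × List (Int × Int) :=
  if |pv.1 - pos| ≤ md then (st.1 + pv.2, st.2) else (st.1, st.2 ++ [pv])

theorem pvKeepFold_length_le (md pos : Int) (l : List (Int × Int)) (a : Int) (keep : List (Int × Int)) :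
    ((l.foldl (pvBStep md pos) (a, keep)).2).length ≤ keep.length + l.length := by
  induction l generalizing a keep with
  | nil => simp
  | cons x tl ih =>
    simp only [List.foldl_cons, pvBStep]
    split
    · refine Nat.le_trans (ih _ _) ?_
      simp only [List.length_cons]
      omega
    · refine Nat.le_trans (ih _ _) ?_
      simp only [List.length_append, List.length_cons, List.length_nil]
      omega

-- the 'while items:' loop of B
def pvBLoop (md : Int) (items out : List (Int × Int)) : List (Int × Int) :=
  match items with
  | [] => out
  | (pos, val) :: rest =>
    let st := rest.foldl (pvBStep md pos) (val, ([] : List (Int × Int)))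
    pvBLoop md st.2 (out ++ [(pos, st.1)])
termination_by items.length
decreasing_by
  simp only [List.length_cons, List.foldl_attach]
  have := pvKeepFold_length_le md pos rest val []
  simp only [List.length_nil, Nat.zero_add] at this
  omega

def merge_boundaries_by_evidence_alt (boundaries : List (Int × Int)) (merge_distance : Int) : List (Int × Int) :=
  (PySem.Dict.ofList
    (pvBLoop merge_distance
      (PySem.List.sorted (PySem.Dict.ofList boundaries).items (fun item => item.2) true)
      [])).items

-- ===== PRECONDITION & SPEC =====
def Spec_merge_boundaries_by_evidence (boundaries : List (Int × Int)) (merge_distance : Int) (out : List (Int × Int)) : Prop := out = merge_boundaries_by_evidence_alt boundaries merge_distance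
instance (boundaries : List (Int × Int)) (merge_distance : Int) (out : List (Int × Int)) : Decidable (Spec_merge_boundaries_by_evidence boundaries merge_distance out) := by unfold Spec_merge_boundaries_by_evidence; infer_instance

-- ===== CLAIM (what is proved, stated in full; the proofs are below) =====
def Claim_equal_merge_boundaries_by_evidence : Prop := ∀ (boundaries : List (Int × Int)) (merge_distance : Int), Dom_merge_boundaries_by_evidence boundaries merge_distance → Spec_merge_boundaries_by_evidence boundaries merge_distance (merge_boundaries_by_evidence boundaries merge_distance)

-- ===== LEMMAS AND PROOFS =====

-- indices (0-based, from s) of the items of l within md of bp — what A's to_remove collects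
def pvIdxFrom (md bp : Int) : Int → List (Int × Int) → List Int
  | _, [] => []
  | s, x :: xs =>
    if |x.1 - bp| ≤ md then s :: pvIdxFrom md bp (s + 1) xs else pvIdxFrom md bp (s + 1) xs

theorem pvIdxFrom_mem (md bp : Int) (l : List (Int × Int)) (s : Int) :
    ∀ i ∈ pvIdxFrom md bp s l, s ≤ i ∧ i < s + l.length := by
  induction l generalizing s with
  | nil => simp [pvIdxFrom]
  | cons x xs ih =>
    intro i hi
    simp only [pvIdxFrom] at hi
    split at hi
    · rcases List.mem_cons.1 hi with h | h
      · subst h; simp only [List.length_cons]; push_cast; omega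
      · have := ih (s + 1) i h; simp only [List.length_cons]; push_cast; omega
    · have := ih (s + 1) i hi; simp only [List.length_cons]; push_cast; omega

theorem pvIdxFrom_pairwise (md bp : Int) (l : List (Int × Int)) (s : Int) :
    (pvIdxFrom md bp s l).Pairwise (· < ·) := by
  induction l generalizing s with
  | nil => simp [pvIdxFrom]
  | cons x xs ih =>
    simp only [pvIdxFrom]
    split
    · refine List.Pairwise.cons ?_ (ih (s + 1))
      intro j hj
      have := pvIdxFrom_mem md bp xs (s + 1) j hj
      omega
    · exact ih (s + 1)

-- A's inner enumerate loop, characterised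
theorem pvAFold_eq (md bp : Int) (l : List (Int × Int)) (s a : Int) (tr : List Int) :
    (PySem.List.enumerate l s).foldl (pvAStep md bp) (a, tr)
    = (a + ((l.filter (fun pv => |pv.1 - bp| ≤ md)).map (·.2)).sum,
       tr ++ pvIdxFrom md bp s l) := by
  induction l generalizing s a tr with
  | nil => simp [PySem.List.enumerate_nil, pvIdxFrom]
  | cons x xs ih =>
    rw [PySem.List.enumerate_cons, List.foldl_cons]
    by_cases h : |x.1 - bp| ≤ md
    · simp only [pvAStep, h, if_pos, decide_true, List.filter_cons_of_pos, pvIdxFrom,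
        List.map_cons, List.sum_cons]
      rw [ih]
      refine Prod.ext ?_ ?_
      · simp; ring
      · simp
    · simp only [pvAStep, h, if_neg, not_false_iff, pvIdxFrom]
      rw [ih]
      simp [h]

-- B's partition pass, characterised
theorem pvBFold_eq (md pos : Int) (l : List (Int × Int)) (a : Int) (keep : List (Int × Int)) :
    l.foldl (pvBStep md pos) (a, keep)
    = (a + ((l.filter (fun pv => |pv.1 - pos| ≤ md)).map (·.2)).sum,
       keep ++ l.filter (fun pv => !decide (|pv.1 - pos| ≤ md))) := by
  induction l generalizing a keep with
  | nil => simp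
  | cons x xs ih =>
    rw [List.foldl_cons]
    by_cases h : |x.1 - pos| ≤ md
    · simp only [pvBStep, h, if_pos, decide_true, List.filter_cons_of_pos, List.map_cons,
        List.sum_cons]
      rw [ih]
      refine Prod.ext ?_ ?_
      · simp; ring
      · simp [h]
    · simp only [pvBStep, h, if_neg, not_false_iff]
      rw [ih]
      simp [h]

theorem pvIdxFrom_append (md bp : Int) (l : List (Int × Int)) (x : Int × Int) (s : Int) :
    pvIdxFrom md bp s (l ++ [x])
      = pvIdxFrom md bp s l ++ (if |x.1 - bp| ≤ md then [s + l.length] else []) := by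
  induction l generalizing s with
  | nil => simp [pvIdxFrom]
  | cons y ys ih =>
    simp only [List.cons_append, pvIdxFrom]
    rw [ih]
    by_cases hx : |x.1 - bp| ≤ md
    · simp only [hx, if_true, List.length_cons]
      have hc : s + 1 + (ys.length : Int) = s + ((ys.length : Int) + 1) := by ring
      push_cast
      rw [hc]
      split <;> simp
    · simp [hx]

-- popping strictly-descending in-range indices commutes with a trailing element
theorem pvPopFold_append (idxs : List Int) (l : List (Int × Int)) (x : Int × Int)
    (hb : ∀ i ∈ idxs, 0 ≤ i ∧ i < (l.length : Int))
    (hp : idxs.Pairwise (fun a b => b < a)) :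
    idxs.foldl pvPopAt (l ++ [x]) = idxs.foldl pvPopAt l ++ [x] := by
  induction idxs generalizing l with
  | nil => simp
  | cons i tl ih =>
    obtain ⟨h0, hlt⟩ := hb i (List.mem_cons_self ..)
    rcases List.pairwise_cons.1 hp with ⟨hhd, htl⟩
    have hn : i.toNat < l.length := by omega
    have hcast : ((i.toNat : Nat) : Int) = i := by omega
    have h1 : pvPopAt (l ++ [x]) i = l.eraseIdx i.toNat ++ [x] := by
      unfold pvPopAt
      conv_lhs => rw [← hcast]
      rw [PySem.List.pop?_natCast _ _ (by simp; omega)]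
      simp [List.eraseIdx_append_of_lt_length hn]
    have h2 : pvPopAt l i = l.eraseIdx i.toNat := by
      unfold pvPopAt
      conv_lhs => rw [← hcast]
      rw [PySem.List.pop?_natCast _ _ hn]
    simp only [List.foldl_cons, h1, h2]
    refine ih _ ?_ htl
    intro j hj
    have hji := hhd j hj
    have := (hb j (List.mem_cons_of_mem _ hj)).1
    rw [List.length_eraseIdx_of_lt hn]
    constructor
    · exact this
    · push_cast; omega

-- removing A's to_remove indices (descending) is exactly B's partition filter
theorem pvPopFold_idx (md bp : Int) (l : List (Int × Int)) :
    (pvIdxFrom md bp 0 l).reverse.foldl pvPopAt l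
      = l.filter (fun pv => !decide (|pv.1 - bp| ≤ md)) := by
  induction l using List.reverseRecOn with
  | nil => simp [pvIdxFrom]
  | append_singleton l x ih =>
    rw [pvIdxFrom_append]
    by_cases h : |x.1 - bp| ≤ md
    · simp only [h, if_pos, List.reverse_append, List.reverse_cons, List.reverse_nil,
        List.nil_append, List.singleton_append, List.foldl_cons]
      have hpop : pvPopAt (l ++ [x]) ((0 : Int) + l.length) = l := by
        unfold pvPopAt
        have hc : ((0 : Int) + l.length) = ((l.length : Nat) : Int) := by push_cast; ring
        conv_lhs => rw [hc]
        rw [PySem.List.pop?_natCast _ _ (by simp)]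
        simp [List.eraseIdx_append_of_length_le (Nat.le_refl _)]
      rw [hpop, ih, List.filter_append]
      simp [h]
    · simp only [h, if_neg, not_false_iff, List.append_nil]
      rw [pvPopFold_append _ l x ?_ ?_, ih, List.filter_append]
      · simp [h]
      · intro i hi
        have := pvIdxFrom_mem md bp l 0 i (List.mem_reverse.1 hi)
        omega
      · exact (List.pairwise_reverse).2 (pvIdxFrom_pairwise md bp l 0)

-- B's loop accumulator law
theorem pvBLoop_out (md : Int) (l : List (Int × Int)) :
    ∀ out, pvBLoop md l out = out ++ pvBLoop md l [] := by
  induction hn : l.length using Nat.strong_induction_on generalizing l with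
  | _ n ih =>
  intro out
  match l with
  | [] => simp [pvBLoop]
  | (pos, val) :: rest =>
    rw [pvBLoop.eq_def]
    conv_rhs => rw [pvBLoop.eq_def]
    simp only
    have hlt : ((rest.foldl (pvBStep md pos) (val, ([] : List (Int × Int)))).2).length < n := by
      have := pvKeepFold_length_le md pos rest val []
      simp only [List.length_nil, Nat.zero_add] at this
      simp only [List.length_cons] at hn
      omega
    rw [ih _ hlt _ rfl (out ++ _), ih _ hlt _ rfl ([] ++ _)]
    simp

-- the central correspondence: A's while-loop is B's while-loop folded into the dict
theorem pvALoop_eq (md : Int) (l : List (Int × Int)) :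
    ∀ merged, pvALoop md l merged
      = (pvBLoop md l []).foldl (fun d kv => d.insert kv.1 kv.2) merged := by
  induction hn : l.length using Nat.strong_induction_on generalizing l with
  | _ n ih =>
  intro merged
  match l with
  | [] => rw [pvALoop.eq_def, pvBLoop.eq_def]; simp
  | (bp, bv) :: rest =>
    rw [pvALoop.eq_def]
    conv_rhs => rw [pvBLoop.eq_def]
    simp only
    rw [pvAFold_eq md bp rest 0 bv [], pvBFold_eq md bp rest bv []]
    simp only [List.nil_append]
    have hsorted : PySem.List.sorted (pvIdxFrom md bp 0 rest) (fun x => x) true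
        = (pvIdxFrom md bp 0 rest).reverse := by
      refine PySem.List.sorted_rev_eq_of_perm_of_pairwise_gt _ _ (fun x => x)
        (List.reverse_perm _) ?_
      exact (List.pairwise_reverse).2 (pvIdxFrom_pairwise md bp rest 0)
    rw [hsorted, pvPopFold_idx md bp rest]
    have hlt : (rest.filter (fun pv => !decide (|pv.1 - bp| ≤ md))).length < n := by
      have := List.length_filter_le (fun pv => !decide (|pv.1 - bp| ≤ md)) rest
      simp only [List.length_cons] at hn
      omega
    rw [ih _ hlt _ rfl, pvBLoop_out md _ ([(bp, _)] )]
    simp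

-- ===== VERDICT (by name: the statement is the Claim_ definition above) =====
theorem merge_boundaries_by_evidence_spec : Claim_equal_merge_boundaries_by_evidence := by
  intro boundaries merge_distance _
  unfold Spec_merge_boundaries_by_evidence merge_boundaries_by_evidence
    merge_boundaries_by_evidence_alt
  rw [pvALoop_eq]
  rfl
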